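-- pv_equiv track=rewrite | github.com/andwilley/pyalgos | distinctechosubs.py | distinctEchoSubstrings
-- ===== SOURCE A (Python) =====
-- def distinctEchoSubstrings(text: str) -> int:
--     all_subs = set([])
--     dub_subs = set([])
--
--     for c in text:
--         temp_subs = set([])
--
--         for sub in all_subs:
--             new_sub = sub + c
--             temp_subs.add(sub + c)
--             if len(new_sub) >= 2 and len(new_sub) % 2 == 0 and new_sub[:len(new_sub) // 2] == new_sub[len(new_sub) // 2:]:
--                 dub_subs.add(new_sub)
--
--         temp_subs.add(c)
--         all_subs = temp_subs
--
--     return len(dub_subs)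
-- ===== SOURCE B (Python) =====
-- def distinctEchoSubstrings(text: str) -> int:
--     # Directly scan all (start, half-length) pairs and collect the doubled
--     # substrings into a set, instead of incrementally maintaining the set of
--     # all substrings ending at each position.
--     n = len(text)
--     echoes = set()
--     for k in range(1, n // 2 + 1):
--         for i in range(0, n - 2 * k + 1):
--             if text[i:i + k] == text[i + k:i + 2 * k]:
--                 echoes.add(text[i:i + 2 * k])
--     return len(echoes)
-- ===== Notes on version B (the rewrite author's own statement) =====
-- stated objective: faster
-- what changed: Instead of A's per-character maintenance of the set of all substrings ending at each position (re-hashing every suffix at every step), B scans (start, half-length) pairs directly and only puts actual echo substrings into a set.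
import Mathlib
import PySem

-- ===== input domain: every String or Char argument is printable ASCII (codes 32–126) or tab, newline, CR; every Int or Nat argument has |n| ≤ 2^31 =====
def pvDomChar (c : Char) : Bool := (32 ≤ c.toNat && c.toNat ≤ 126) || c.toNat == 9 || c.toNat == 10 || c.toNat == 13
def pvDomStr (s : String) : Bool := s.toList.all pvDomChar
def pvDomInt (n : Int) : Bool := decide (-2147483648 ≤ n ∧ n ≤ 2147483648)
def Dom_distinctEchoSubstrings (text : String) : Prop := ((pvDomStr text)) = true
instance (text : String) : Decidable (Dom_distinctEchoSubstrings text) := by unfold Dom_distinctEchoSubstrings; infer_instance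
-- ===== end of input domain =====

-- B replaces A's incremental maintenance of all substrings ending at each position
-- by a direct scan over (start, half-length) pairs; measurably faster by a constant factor
-- (only echo candidates ever enter a set).


-- ===== PORT A =====
-- substrings are carried as their character lists (exact: comparison and
-- concatenation of ASCII strings agree with List Char operations)
def pvAInner (c : Char) (p : PySem.Set (List Char) × PySem.Set (List Char))
    (sub : List Char) : PySem.Set (List Char) × PySem.Set (List Char) :=
  let ns := sub ++ [c]
  (PySem.Set.add p.1 ns,
   if 2 ≤ (ns.length : Int) ∧ PySem.Int.mod (ns.length : Int) 2 = 0 ∧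
       PySem.List.slice ns none (some (PySem.Int.floordiv (ns.length : Int) 2)) =
       PySem.List.slice ns (some (PySem.Int.floordiv (ns.length : Int) 2)) none
   then PySem.Set.add p.2 ns else p.2)

def pvAStep (st : PySem.Set (List Char) × PySem.Set (List Char)) (c : Char) :
    PySem.Set (List Char) × PySem.Set (List Char) :=
  let r := st.1.foldl (pvAInner c) (PySem.Set.empty, st.2)
  (PySem.Set.add r.1 [c], r.2)

def distinctEchoSubstrings (text : String) : Int :=
  ((text.toList.foldl pvAStep (PySem.Set.empty, PySem.Set.empty)).2.length : Int)

-- ===== PORT B =====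
def distinctEchoSubstrings_alt (text : String) : Int :=
  let l := text.toList
  let n : Int := l.length
  let echoes : PySem.Set (List Char) :=
    (PySem.List.pyRange 1 (PySem.Int.floordiv n 2 + 1) 1).foldl (fun s k =>
      (PySem.List.pyRange 0 (n - 2 * k + 1) 1).foldl (fun s i =>
        if PySem.List.slice l (some i) (some (i + k)) =
            PySem.List.slice l (some (i + k)) (some (i + 2 * k))
        then PySem.Set.add s (PySem.List.slice l (some i) (some (i + 2 * k)))
        else s) s)
      PySem.Set.empty
  (echoes.length : Int)

-- ===== PRECONDITION & SPEC =====
def Spec_distinctEchoSubstrings (text : String) (out : Int) : Prop := out = distinctEchoSubstrings_alt text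
instance (text : String) (out : Int) : Decidable (Spec_distinctEchoSubstrings text out) := by unfold Spec_distinctEchoSubstrings; infer_instance

-- ===== CLAIM (what is proved, stated in full; the proofs are below) =====
def Claim_equal_distinctEchoSubstrings : Prop := ∀ (text : String), Dom_distinctEchoSubstrings text → Spec_distinctEchoSubstrings text (distinctEchoSubstrings text)

-- ===== LEMMAS AND PROOFS =====

/-- an echo (doubled) string -/
def IsEcho (y : List Char) : Prop := ∃ t : List Char, t ≠ [] ∧ y = t ++ t

theorem mem_foldl_step {α β : Type} (g : List β → α → List β) (Q : α → β → Prop)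
    (h : ∀ s x y, y ∈ g s x ↔ y ∈ s ∨ Q x y) :
    ∀ (l : List α) (s : List β) (y : β), y ∈ l.foldl g s ↔ y ∈ s ∨ ∃ x ∈ l, Q x y := by
  intro l
  induction l with
  | nil => simp
  | cons a l ih =>
    intro s y
    simp only [List.foldl_cons, ih, h, List.mem_cons]
    constructor
    · rintro ((hy | hq) | ⟨x, hx, hQ⟩)
      · exact Or.inl hy
      · exact Or.inr ⟨a, Or.inl rfl, hq⟩
      · exact Or.inr ⟨x, Or.inr hx, hQ⟩
    · rintro (hy | ⟨x, (rfl | hx), hQ⟩)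
      · exact Or.inl (Or.inl hy)
      · exact Or.inl (Or.inr hQ)
      · exact Or.inr ⟨x, hx, hQ⟩

theorem nodup_foldl_step {α β : Type} (g : List β → α → List β)
    (h : ∀ s x, s.Nodup → (g s x).Nodup) :
    ∀ (l : List α) (s : List β), s.Nodup → (l.foldl g s).Nodup := by
  intro l
  induction l with
  | nil => intro s hs; simpa using hs
  | cons a l ih => intro s hs; exact ih _ (h s a hs)

theorem echo_ne_nil {y : List Char} (h : IsEcho y) : 2 ≤ y.length := by
  obtain ⟨t, ht, rfl⟩ := h
  have := List.length_pos_iff.mpr ht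
  simp; omega

theorem echo_cond_iff (ns : List Char) :
    (2 ≤ (ns.length : Int) ∧ PySem.Int.mod (ns.length : Int) 2 = 0 ∧
      PySem.List.slice ns none (some (PySem.Int.floordiv (ns.length : Int) 2)) =
      PySem.List.slice ns (some (PySem.Int.floordiv (ns.length : Int) 2)) none)
    ↔ IsEcho ns := by
  have hfd : PySem.Int.floordiv (ns.length : Int) 2 = ((ns.length / 2 : Nat) : Int) := by
    exact_mod_cast PySem.Int.floordiv_natCast ns.length 2
  have hmd : PySem.Int.mod (ns.length : Int) 2 = ((ns.length % 2 : Nat) : Int) := by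
    exact_mod_cast PySem.Int.mod_natCast ns.length 2
  rw [hfd, hmd, PySem.List.slice_to_natCast, PySem.List.slice_from_natCast]
  constructor
  · rintro ⟨h2, hmod, heq⟩
    have hm2 : ns.length % 2 = 0 := by exact_mod_cast hmod
    have h2' : 2 ≤ ns.length := by exact_mod_cast h2
    refine ⟨ns.take (ns.length / 2), ?_, ?_⟩
    · have hlen : (ns.take (ns.length / 2)).length = ns.length / 2 := by
        rw [List.length_take]; omega
      intro h
      rw [h] at hlen
      simp at hlen
      omega
    · conv_lhs => rw [← List.take_append_drop (ns.length / 2) ns]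
      rw [← heq]
  · rintro ⟨t, ht, rfl⟩
    have hl : (t ++ t).length = 2 * t.length := by simp; ring
    have hpos : 0 < t.length := List.length_pos_iff.mpr ht
    have hhalf : (t ++ t).length / 2 = t.length := by omega
    refine ⟨by simp; omega, by simp; omega, ?_⟩
    rw [hhalf, List.take_left, List.drop_left]

theorem infix_drop_take (l : List Char) (i m : Nat) : (l.drop i).take m <:+: l := by
  refine ⟨l.take i, (l.drop i).drop m, ?_⟩
  rw [List.append_assoc, List.take_append_drop, List.take_append_drop]

theorem infix_iff_drop_take (l y : List Char) :
    y <:+: l ↔ ∃ i : Nat, i + y.length ≤ l.length ∧ y = (l.drop i).take y.length := by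
  constructor
  · rintro ⟨s, t, rfl⟩
    refine ⟨s.length, by simp, ?_⟩
    rw [List.append_assoc, List.drop_left, List.take_left]
  · rintro ⟨i, _, hy⟩
    rw [hy]
    exact infix_drop_take l i y.length

theorem pvAInner_fold (c : Char) (all : List (List Char)) :
    ∀ (p : PySem.Set (List Char) × PySem.Set (List Char)),
    (∀ y, y ∈ (all.foldl (pvAInner c) p).1 ↔ y ∈ p.1 ∨ ∃ sub ∈ all, y = sub ++ [c]) ∧
    (∀ y, y ∈ (all.foldl (pvAInner c) p).2 ↔
      y ∈ p.2 ∨ ∃ sub ∈ all, IsEcho (sub ++ [c]) ∧ y = sub ++ [c]) ∧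
    (p.1.Nodup → (all.foldl (pvAInner c) p).1.Nodup) ∧
    (p.2.Nodup → (all.foldl (pvAInner c) p).2.Nodup) := by
  induction all with
  | nil => intro p; simp
  | cons a all ih =>
    intro p
    simp only [List.foldl_cons]
    obtain ⟨ih1, ih2, ih3, ih4⟩ := ih (pvAInner c p a)
    refine ⟨?_, ?_, ?_, ?_⟩
    · intro y
      rw [ih1]
      simp only [pvAInner, PySem.Set.mem_add, List.mem_cons]
      constructor
      · rintro ((hy | rfl) | ⟨sub, hs, rfl⟩)
        · exact Or.inl hy
        · exact Or.inr ⟨a, Or.inl rfl, rfl⟩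
        · exact Or.inr ⟨sub, Or.inr hs, rfl⟩
      · rintro (hy | ⟨sub, (rfl | hs), rfl⟩)
        · exact Or.inl (Or.inl hy)
        · exact Or.inl (Or.inr rfl)
        · exact Or.inr ⟨sub, hs, rfl⟩
    · intro y
      rw [ih2]
      simp only [pvAInner, List.mem_cons]
      by_cases hE : IsEcho (a ++ [c])
      · rw [if_pos ((echo_cond_iff _).mpr hE)]
        simp only [PySem.Set.mem_add]
        constructor
        · rintro ((hy | rfl) | ⟨sub, hs, hEs, rfl⟩)
          · exact Or.inl hy
          · exact Or.inr ⟨a, Or.inl rfl, hE, rfl⟩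
          · exact Or.inr ⟨sub, Or.inr hs, hEs, rfl⟩
        · rintro (hy | ⟨sub, (rfl | hs), hEs, rfl⟩)
          · exact Or.inl (Or.inl hy)
          · exact Or.inl (Or.inr rfl)
          · exact Or.inr ⟨sub, hs, hEs, rfl⟩
      · rw [if_neg (fun h => hE ((echo_cond_iff _).mp h))]
        constructor
        · rintro (hy | ⟨sub, hs, hEs, rfl⟩)
          · exact Or.inl hy
          · exact Or.inr ⟨sub, Or.inr hs, hEs, rfl⟩
        · rintro (hy | ⟨sub, (rfl | hs), hEs, rfl⟩)
          · exact Or.inl hy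
          · exact absurd hEs hE
          · exact Or.inr ⟨sub, hs, hEs, rfl⟩
    · intro hnd
      refine ih3 ?_
      show (PySem.Set.add p.1 (a ++ [c])).Nodup
      exact PySem.Set.nodup_add _ _ hnd
    · intro hnd
      refine ih4 ?_
      show List.Nodup (if _ then PySem.Set.add p.2 (a ++ [c]) else p.2)
      split_ifs with h
      · exact PySem.Set.nodup_add _ _ hnd
      · exact hnd

theorem A_invariant (l : List Char) :
    (l.foldl pvAStep (PySem.Set.empty, PySem.Set.empty)).1.Nodup ∧
    (l.foldl pvAStep (PySem.Set.empty, PySem.Set.empty)).2.Nodup ∧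
    (∀ y, y ∈ (l.foldl pvAStep (PySem.Set.empty, PySem.Set.empty)).1 ↔ y ≠ [] ∧ y <:+ l) ∧
    (∀ y, y ∈ (l.foldl pvAStep (PySem.Set.empty, PySem.Set.empty)).2 ↔ IsEcho y ∧ y <:+: l) := by
  induction l using List.reverseRecOn with
  | nil =>
    refine ⟨List.nodup_nil, List.nodup_nil, ?_, ?_⟩
    · intro y; simp [PySem.Set.empty]
    · intro y
      simp only [PySem.Set.empty, List.infix_nil, List.foldl_nil, List.not_mem_nil, false_iff]
      rintro ⟨hE, rfl⟩
      exact absurd (echo_ne_nil hE) (by simp)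
  | append_singleton l c ih =>
    obtain ⟨h1, h2, hm1, hm2⟩ := ih
    rw [List.foldl_append]
    simp only [List.foldl_cons, List.foldl_nil, pvAStep]
    obtain ⟨f1, f2, f3, f4⟩ :=
      pvAInner_fold c (l.foldl pvAStep (PySem.Set.empty, PySem.Set.empty)).1
        (PySem.Set.empty, (l.foldl pvAStep (PySem.Set.empty, PySem.Set.empty)).2)
    refine ⟨?_, ?_, ?_, ?_⟩
    · exact PySem.Set.nodup_add _ _ (f3 List.nodup_nil)
    · exact f4 h2
    · intro y
      show y ∈ PySem.Set.add _ [c] ↔ _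
      rw [PySem.Set.mem_add, f1, List.suffix_concat_iff]
      constructor
      · rintro ((hy | ⟨sub, hs, rfl⟩) | rfl)
        · exact absurd hy (List.not_mem_nil)
        · obtain ⟨hne, hsuf⟩ := (hm1 sub).mp hs
          exact ⟨by simp, Or.inr ⟨sub, rfl, hsuf⟩⟩
        · exact ⟨by simp, Or.inr ⟨[], rfl, List.nil_suffix⟩⟩
      · rintro ⟨hne, (rfl | ⟨t, rfl, ht⟩)⟩
        · exact absurd rfl hne
        · rcases eq_or_ne t [] with rfl | htne
          · exact Or.inr (by simp)
          · exact Or.inl (Or.inr ⟨t, (hm1 t).mpr ⟨htne, ht⟩, rfl⟩)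
    · intro y
      rw [f2, hm2, List.infix_concat_iff]
      constructor
      · rintro (⟨hE, hinf⟩ | ⟨sub, hs, hEs, rfl⟩)
        · exact ⟨hE, Or.inr hinf⟩
        · obtain ⟨hne, hsuf⟩ := (hm1 sub).mp hs
          exact ⟨hEs, Or.inl (List.suffix_concat_iff.mpr (Or.inr ⟨sub, rfl, hsuf⟩))⟩
      · rintro ⟨hE, (hsuf | hinf)⟩
        · rcases List.suffix_concat_iff.mp hsuf with rfl | ⟨t, rfl, ht⟩
          · exact absurd (echo_ne_nil hE) (by simp)
          · have htne : t ≠ [] := by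
              intro h; subst h
              have := echo_ne_nil hE; simp at this
            exact Or.inr ⟨t, (hm1 t).mpr ⟨htne, ht⟩, hE, rfl⟩
        · exact Or.inl ⟨hE, hinf⟩

theorem B_characterization (l : List Char) :
    (((PySem.List.pyRange 1 (PySem.Int.floordiv (l.length : Int) 2 + 1) 1).foldl (fun s k =>
      (PySem.List.pyRange 0 ((l.length : Int) - 2 * k + 1) 1).foldl (fun s i =>
        if PySem.List.slice l (some i) (some (i + k)) =
            PySem.List.slice l (some (i + k)) (some (i + 2 * k))
        then PySem.Set.add s (PySem.List.slice l (some i) (some (i + 2 * k)))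
        else s) s)
      PySem.Set.empty : List (List Char))).Nodup ∧
    ∀ y, y ∈ ((PySem.List.pyRange 1 (PySem.Int.floordiv (l.length : Int) 2 + 1) 1).foldl (fun s k =>
      (PySem.List.pyRange 0 ((l.length : Int) - 2 * k + 1) 1).foldl (fun s i =>
        if PySem.List.slice l (some i) (some (i + k)) =
            PySem.List.slice l (some (i + k)) (some (i + 2 * k))
        then PySem.Set.add s (PySem.List.slice l (some i) (some (i + 2 * k)))
        else s) s)
      PySem.Set.empty : List (List Char)) ↔ IsEcho y ∧ y <:+: l := by
  have hinner : ∀ (k : Int) (s : PySem.Set (List Char)) (y : List Char),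
      y ∈ (PySem.List.pyRange 0 ((l.length : Int) - 2 * k + 1) 1).foldl (fun s i =>
        if PySem.List.slice l (some i) (some (i + k)) =
            PySem.List.slice l (some (i + k)) (some (i + 2 * k))
        then PySem.Set.add s (PySem.List.slice l (some i) (some (i + 2 * k)))
        else s) s ↔ y ∈ s ∨ ∃ i ∈ PySem.List.pyRange 0 ((l.length : Int) - 2 * k + 1) 1,
          PySem.List.slice l (some i) (some (i + k)) =
            PySem.List.slice l (some (i + k)) (some (i + 2 * k)) ∧
          y = PySem.List.slice l (some i) (some (i + 2 * k)) := by
    intro k s y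
    refine mem_foldl_step _ (fun i y =>
        PySem.List.slice l (some i) (some (i + k)) =
          PySem.List.slice l (some (i + k)) (some (i + 2 * k)) ∧
        y = PySem.List.slice l (some i) (some (i + 2 * k))) ?_ _ s y
    intro s i y
    split_ifs with hc
    · rw [PySem.Set.mem_add]; tauto
    · tauto
  have hmem : ∀ y, (y ∈ ((PySem.List.pyRange 1 (PySem.Int.floordiv (l.length : Int) 2 + 1) 1).foldl (fun s k =>
      (PySem.List.pyRange 0 ((l.length : Int) - 2 * k + 1) 1).foldl (fun s i =>
        if PySem.List.slice l (some i) (some (i + k)) =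
            PySem.List.slice l (some (i + k)) (some (i + 2 * k))
        then PySem.Set.add s (PySem.List.slice l (some i) (some (i + 2 * k)))
        else s) s)
      PySem.Set.empty : List (List Char)) ↔
      ∃ k ∈ PySem.List.pyRange 1 (PySem.Int.floordiv (l.length : Int) 2 + 1) 1,
        ∃ i ∈ PySem.List.pyRange 0 ((l.length : Int) - 2 * k + 1) 1,
          PySem.List.slice l (some i) (some (i + k)) =
            PySem.List.slice l (some (i + k)) (some (i + 2 * k)) ∧
          y = PySem.List.slice l (some i) (some (i + 2 * k))) := by
    intro y
    rw [mem_foldl_step _ _ (fun s k y => hinner k s y) _ PySem.Set.empty y]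
    simp [PySem.Set.empty]
  refine ⟨?_, ?_⟩
  · refine nodup_foldl_step _ ?_ _ _ List.nodup_nil
    intro s k hs
    refine nodup_foldl_step _ ?_ _ _ hs
    intro s i hs'
    split_ifs with hc
    · exact PySem.Set.nodup_add _ _ hs'
    · exact hs'
  · intro y
    rw [hmem y]
    constructor
    · rintro ⟨k, hk, i, hi, hcond, rfl⟩
      rw [PySem.List.mem_pyRange_one] at hk hi
      have hfd : PySem.Int.floordiv (l.length : Int) 2 = ((l.length / 2 : Nat) : Int) := by
        exact_mod_cast PySem.Int.floordiv_natCast l.length 2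
      rw [hfd] at hk
      obtain ⟨hk1, hk2⟩ := hk
      obtain ⟨hi0, hi1⟩ := hi
      set κ := k.toNat with hκ
      set ι := i.toNat with hι
      have hke : k = (κ : Int) := (Int.toNat_of_nonneg (by omega)).symm
      have hie : i = (ι : Int) := (Int.toNat_of_nonneg hi0).symm
      have hbound : ι + (κ + κ) ≤ l.length := by
        rw [hke] at hi1; rw [hie] at hi1
        omega
      have h1 : PySem.List.slice l (some i) (some (i + k)) = (l.drop ι).take κ := by
        rw [hie, hke]; exact PySem.List.slice_natCast_add l ι κ
      have h2 : PySem.List.slice l (some (i + k)) (some (i + 2 * k)) = (l.drop (ι + κ)).take κ := by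
        have e1 : i + k = ((ι + κ : Nat) : Int) := by rw [hie, hke]; push_cast; ring
        have e2 : i + 2 * k = ((ι + κ : Nat) : Int) + (κ : Int) := by rw [hie, hke]; push_cast; ring
        rw [e1, e2]; exact PySem.List.slice_natCast_add l (ι + κ) κ
      have h3 : PySem.List.slice l (some i) (some (i + 2 * k)) = (l.drop ι).take (κ + κ) := by
        have e2 : (ι : Int) + 2 * k = (ι : Int) + ((κ + κ : Nat) : Int) := by
          rw [hke]; push_cast; ring
        rw [hie, e2]; exact PySem.List.slice_natCast_add l ι (κ + κ)
      rw [h1, h2] at hcond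
      rw [h3]
      constructor
      · refine ⟨(l.drop ι).take κ, ?_, ?_⟩
        · have : ((l.drop ι).take κ).length = κ := by
            rw [List.length_take, List.length_drop]; omega
          intro h; rw [h] at this; simp at this; omega
        · rw [List.take_add, List.drop_drop, ← hcond]
      · exact infix_drop_take l ι (κ + κ)
    · rintro ⟨⟨t, htne, rfl⟩, hinf⟩
      obtain ⟨ι, hb, hy⟩ := (infix_iff_drop_take l _).mp hinf
      have hκ1 : 1 ≤ t.length := List.length_pos_iff.mpr htne
      have hlen : (t ++ t).length = t.length + t.length := by simp
      rw [hlen] at hb hy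
      have ht1 : (l.drop ι).take t.length = t := by
        have h := congrArg (List.take t.length) hy
        rw [List.take_take, List.take_append_of_le_length (le_refl _), List.take_length] at h
        have hmin : min t.length (t.length + t.length) = t.length := by omega
        rw [hmin] at h
        exact h.symm
      have ht2 : (l.drop (ι + t.length)).take t.length = t := by
        have h := congrArg (List.drop t.length) hy
        rw [List.drop_append_of_le_length (le_refl _), List.drop_length, List.nil_append,
          List.drop_take, List.drop_drop] at h
        have e : t.length + t.length - t.length = t.length := by omega
        rw [e] at h
        exact h.symm
      refine ⟨(t.length : Int), ?_, (ι : Int), ?_, ?_, ?_⟩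
      · rw [PySem.List.mem_pyRange_one]
        have hfd : PySem.Int.floordiv (l.length : Int) 2 = ((l.length / 2 : Nat) : Int) := by
          exact_mod_cast PySem.Int.floordiv_natCast l.length 2
        rw [hfd]
        have : t.length ≤ l.length / 2 := by omega
        omega
      · rw [PySem.List.mem_pyRange_one]
        omega
      · have e1 : PySem.List.slice l (some (ι : Int)) (some ((ι : Int) + (t.length : Int))) = (l.drop ι).take t.length :=
          PySem.List.slice_natCast_add l ι t.length
        have e2 : PySem.List.slice l (some ((ι : Int) + (t.length : Int))) (some ((ι : Int) + 2 * (t.length : Int))) = (l.drop (ι + t.length)).take t.length := by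
          have a1 : (ι : Int) + (t.length : Int) = ((ι + t.length : Nat) : Int) := by push_cast; ring
          have a2 : (ι : Int) + 2 * (t.length : Int) = ((ι + t.length : Nat) : Int) + (t.length : Int) := by push_cast; ring
          rw [a1, a2]; exact PySem.List.slice_natCast_add l (ι + t.length) t.length
        rw [e1, e2, ht1, ht2]
      · have e3 : PySem.List.slice l (some (ι : Int)) (some ((ι : Int) + 2 * (t.length : Int))) = (l.drop ι).take (t.length + t.length) := by
          have a2 : (ι : Int) + 2 * (t.length : Int) = (ι : Int) + ((t.length + t.length : Nat) : Int) := by push_cast; ring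
          rw [a2]; exact PySem.List.slice_natCast_add l ι (t.length + t.length)
        rw [e3, ← hy]

-- ===== VERDICT (by name: the statement is the Claim_ definition above) =====
theorem distinctEchoSubstrings_spec : Claim_equal_distinctEchoSubstrings := by
  intro text _
  unfold Spec_distinctEchoSubstrings distinctEchoSubstrings distinctEchoSubstrings_alt
  obtain ⟨_, hn2, _, hm2⟩ := A_invariant text.toList
  obtain ⟨hnB, hmB⟩ := B_characterization text.toList
  have hperm : ((text.toList.foldl pvAStep (PySem.Set.empty, PySem.Set.empty)).2).Perm _ :=
    (List.perm_ext_iff_of_nodup hn2 hnB).2 (fun y => by rw [hm2 y, hmB y])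
  exact congrArg (fun n : Nat => (n : Int)) hperm.length_eq
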